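-- pv_equiv track=rewrite | github.com/matsuren/crownconv360depth | utils/geometry_helper.py | get_rect_idxs
-- ===== SOURCE A (Python) =====
-- def get_rect_idxs(x, y):
--     rect_idxs = []
--     for i in range(5):
--         x_min = i
--         x_max = x_min + 1
--         y_min = -i
--         y_max = y_min + 2
--         if x_min <= x <= x_max and y_min <= y <= y_max:
--             rect_idxs.append(i)
--     return rect_idxs
-- ===== SOURCE B (Python) =====
-- def get_rect_idxs(x, y):
--     lo = max(x - 1, -y, 0)
--     hi = min(x, 2 - y, 4)
--     return list(range(lo, hi + 1))
-- ===== Notes on version B (the rewrite author's own statement) =====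
-- stated objective: simpler
-- what changed: Replaces the fixed 5-iteration rectangle-membership scan with a closed-form intersection of the inverted inequalities: the qualifying indices form the contiguous integer range [max(x-1,-y,0), min(x,2-y,4)], returned directly.
import Mathlib
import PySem

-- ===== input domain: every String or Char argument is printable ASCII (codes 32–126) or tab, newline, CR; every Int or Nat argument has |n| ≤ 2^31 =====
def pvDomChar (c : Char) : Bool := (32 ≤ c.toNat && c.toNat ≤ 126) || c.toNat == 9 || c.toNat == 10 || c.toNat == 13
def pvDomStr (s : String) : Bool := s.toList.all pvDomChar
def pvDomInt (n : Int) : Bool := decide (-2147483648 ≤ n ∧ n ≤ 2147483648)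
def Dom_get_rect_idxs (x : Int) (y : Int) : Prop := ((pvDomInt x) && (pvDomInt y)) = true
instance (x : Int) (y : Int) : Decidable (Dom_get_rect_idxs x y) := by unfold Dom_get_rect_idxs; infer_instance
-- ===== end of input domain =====

-- B replaces A's fixed 5-iteration membership scan by the closed-form integer range
-- [max(x-1,-y,0), min(x,2-y,4)] obtained by inverting the per-rectangle inequalities (objective: simpler).

-- ===== PORT A =====
def get_rect_idxs (x : Int) (y : Int) : List Int :=
  (PySem.List.pyRange 0 5 1).foldl (fun rect_idxs i =>
    let x_min := i
    let x_max := x_min + 1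
    let y_min := -i
    let y_max := y_min + 2
    if x_min ≤ x ∧ x ≤ x_max ∧ y_min ≤ y ∧ y ≤ y_max then rect_idxs ++ [i] else rect_idxs) []

-- ===== PORT B =====
def get_rect_idxs_alt (x : Int) (y : Int) : List Int :=
  let lo := max (max (x - 1) (-y)) 0
  let hi := min (min x (2 - y)) 4
  PySem.List.pyRange lo (hi + 1) 1

-- ===== PRECONDITION & SPEC =====
def Spec_get_rect_idxs (x : Int) (y : Int) (out : List Int) : Prop := out = get_rect_idxs_alt x y
instance (x : Int) (y : Int) (out : List Int) : Decidable (Spec_get_rect_idxs x y out) := by unfold Spec_get_rect_idxs; infer_instance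

-- ===== CLAIM (what is proved, stated in full; the proofs are below) =====
def Claim_equal_get_rect_idxs : Prop := ∀ (x : Int) (y : Int), Dom_get_rect_idxs x y → Spec_get_rect_idxs x y (get_rect_idxs x y)

-- ===== LEMMAS AND PROOFS =====
theorem pv_range05 : PySem.List.pyRange 0 5 1 = [0, 1, 2, 3, 4] := by decide

theorem pv_equal (x y : Int) : get_rect_idxs x y = get_rect_idxs_alt x y := by
  by_cases hin : 0 ≤ x ∧ x ≤ 5 ∧ -4 ≤ y ∧ y ≤ 2
  · obtain ⟨h1, h2, h3, h4⟩ := hin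
    interval_cases x <;> interval_cases y <;> decide
  · have hB : get_rect_idxs_alt x y = [] := by
      unfold get_rect_idxs_alt
      exact PySem.List.pyRange_one_eq_nil (by omega)
    rw [hB]
    unfold get_rect_idxs
    rw [pv_range05]
    simp only [List.foldl]
    split_ifs <;> first | rfl | omega

-- ===== VERDICT (by name: the statement is the Claim_ definition above) =====
theorem get_rect_idxs_spec : Claim_equal_get_rect_idxs := by
  intro x y _
  exact pv_equal x y
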